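-- pv_equiv track=rewrite | github.com/MrBrantCode/unitest_baseline | mut_generate/mist_train_taco/taco_3633/solution.py | minimum_cost_to_make_identical_strings
-- ===== SOURCE A (Python) =====
-- import string
-- import itertools
--
-- def minimum_cost_to_make_identical_strings(s, t, n, changes):
--     if len(s) != len(t):
--         return -1, None
--
--     vertices = string.ascii_lowercase
--     g = {c: {c: 0} for c in vertices}
--
--     for (u, v, cost) in changes:
--         cost = int(cost)
--         if v not in g[u] or g[u][v] > cost:
--             g[u][v] = cost
--
--     for p in vertices:
--         for u in vertices:
--             if p not in g[u]:
--                 continue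
--             for v in vertices:
--                 if v not in g[p]:
--                     continue
--                 if v not in g[u] or g[u][v] > g[u][p] + g[p][v]:
--                     g[u][v] = g[u][p] + g[p][v]
--
--     best_costs = {c: {c: 0} for c in vertices}
--     best_chars = {c: {c: c} for c in vertices}
--
--     for (a, b) in itertools.product(vertices, vertices):
--         if a == b:
--             continue
--         best_cost = None
--         best_char = None
--         for c in vertices:
--             if c in g[a] and c in g[b]:
--                 if best_cost is None or best_cost > g[a][c] + g[b][c]:
--                     best_cost = g[a][c] + g[b][c]
--                     best_char = c
--         if b in g[a] and (best_cost is None or best_cost > g[a][b]):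
--             best_cost = g[a][b]
--             best_char = b
--         if a in g[b] and (best_cost is None or best_cost > g[b][a]):
--             best_cost = g[b][a]
--             best_char = a
--         if best_cost is None:
--             continue
--         best_costs[a][b] = best_cost
--         best_chars[a][b] = best_char
--
--     total_cost = 0
--     chars = []
--
--     for (a, b) in zip(s, t):
--         if b not in best_costs[a]:
--             return -1, None
--         total_cost += best_costs[a][b]
--         chars.append(best_chars[a][b])
--
--     result_string = ''.join(chars)
--     return total_cost, result_string
-- ===== SOURCE B (Python) =====
-- def minimum_cost_to_make_identical_strings(s, t, n, changes):
--     if len(s) != len(t):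
--         return -1, None
--
--     # 26x26 index matrix of transform costs; None = unreachable
--     dist = [[0 if i == j else None for j in range(26)] for i in range(26)]
--
--     for (u, v, cost) in changes:
--         i = ord(u) - 97
--         if len(v) == 1:
--             j = ord(v) - 97
--             if 0 <= j < 26:
--                 c = int(cost)
--                 if dist[i][j] is None or dist[i][j] > c:
--                     dist[i][j] = c
--
--     for p in range(26):
--         for u in range(26):
--             if dist[u][p] is None:
--                 continue
--             for v in range(26):
--                 if dist[p][v] is None:
--                     continue
--                 alt = dist[u][p] + dist[p][v]
--                 if dist[u][v] is None or dist[u][v] > alt: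
--                     dist[u][v] = alt
--
--     total = 0
--     out = []
--     for a, b in zip(s, t):
--         if a == b:
--             out.append(a)
--             continue
--         ib = ord(b) - 97
--         if not (0 <= ib < 26):
--             return -1, None
--         ia = ord(a) - 97
--         best = None
--         for c in range(26):
--             if dist[ia][c] is not None and dist[ib][c] is not None:
--                 w = dist[ia][c] + dist[ib][c]
--                 if best is None or best[0] > w:
--                     best = (w, c)
--         if best is None:
--             return -1, None
--         total += best[0]
--         out.append(chr(97 + best[1]))
--     return total, ''.join(out)
-- ===== Notes on version B (the rewrite author's own statement) =====
-- stated objective: alternative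
-- what changed: Replaces the dict-of-dicts graph and the precomputed 26x26 best_costs/best_chars tables by a plain 26x26 integer-indexed cost matrix (None = unreachable) run through the same-order Floyd-Warshall, and resolves each zip(s,t) pair inline by one scan over the 26 letter indices (equal pairs short-circuit, non-letter targets fail the index bounds check).
-- outside the precondition, e.g. on minimum_cost_to_make_identical_strings('aB', 'ca', 0, []): A returns (-1, None), B returns (-1, None)
import Mathlib
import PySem

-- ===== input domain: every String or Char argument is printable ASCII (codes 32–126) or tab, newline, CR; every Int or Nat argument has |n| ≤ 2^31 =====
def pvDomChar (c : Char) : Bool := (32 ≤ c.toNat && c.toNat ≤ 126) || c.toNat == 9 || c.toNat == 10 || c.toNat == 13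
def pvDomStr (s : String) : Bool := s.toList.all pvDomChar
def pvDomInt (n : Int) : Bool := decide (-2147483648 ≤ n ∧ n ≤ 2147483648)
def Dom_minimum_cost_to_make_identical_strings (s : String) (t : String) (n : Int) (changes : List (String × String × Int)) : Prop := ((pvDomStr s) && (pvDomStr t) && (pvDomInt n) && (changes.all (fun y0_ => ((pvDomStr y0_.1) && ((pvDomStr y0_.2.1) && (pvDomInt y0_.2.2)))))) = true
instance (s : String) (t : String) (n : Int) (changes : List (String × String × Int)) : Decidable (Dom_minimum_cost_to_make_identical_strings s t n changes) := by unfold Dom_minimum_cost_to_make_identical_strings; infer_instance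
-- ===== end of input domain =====

-- B replaces A's dict-of-dicts graph and its precomputed best_costs/best_chars tables by a
-- 26×26 integer-indexed cost matrix (none = unreachable) run through the same-order
-- Floyd–Warshall, resolving each character pair of zip(s, t) inline by one scan over the
-- letter indices (objective: alternative; no side effects in either version).

-- ===== PORT A =====

def pvAlpha : List Char := "abcdefghijklmnopqrstuvwxyz".toList
def pvVerts : List String := pvAlpha.map (fun c => String.ofList [c])
def pvG0 : PySem.Dict String (PySem.Dict String Int) :=
  pvVerts.foldl (fun d c => d.insert c (PySem.Dict.insert PySem.Dict.empty c 0)) PySem.Dict.empty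
def pvAddEdge (g : PySem.Dict String (PySem.Dict String Int)) (x : String × String × Int) :
    PySem.Dict String (PySem.Dict String Int) :=
  match g.get? x.1 with
  | none => g
  | some gu =>
    match gu.get? x.2.1 with
    | none => g.insert x.1 (gu.insert x.2.1 x.2.2)
    | some w => if w > x.2.2 then g.insert x.1 (gu.insert x.2.1 x.2.2) else g
def pvRelax (p u v : String) (g : PySem.Dict String (PySem.Dict String Int)) :
    PySem.Dict String (PySem.Dict String Int) :=
  match (g.getD p PySem.Dict.empty).get? v with
  | none => g
  | some gpv =>
    let gup : Int := (g.getD u PySem.Dict.empty).getD p 0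
    match (g.getD u PySem.Dict.empty).get? v with
    | none => g.insert u ((g.getD u PySem.Dict.empty).insert v (gup + gpv))
    | some guv =>
      if guv > gup + gpv then g.insert u ((g.getD u PySem.Dict.empty).insert v (gup + gpv)) else g
def pvFw (g1 : PySem.Dict String (PySem.Dict String Int)) : PySem.Dict String (PySem.Dict String Int) :=
  pvVerts.foldl (fun g p =>
    pvVerts.foldl (fun g u =>
      if ((g.getD u PySem.Dict.empty).get? p).isSome
      then pvVerts.foldl (fun g v => pvRelax p u v g) g
      else g) g) g1
def pvBuild (changes : List (String × String × Int)) : PySem.Dict String (PySem.Dict String Int) :=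
  pvFw (changes.foldl pvAddEdge pvG0)

-- the inner 'for c in vertices' minimisation of A's best-table pass
def pvScan (g : PySem.Dict String (PySem.Dict String Int)) (a b : String) : Option (Int × String) :=
  pvVerts.foldl (fun best c =>
    if (((g.getD a PySem.Dict.empty).get? c).isSome && ((g.getD b PySem.Dict.empty).get? c).isSome) then
      let cost : Int := (g.getD a PySem.Dict.empty).getD c 0 + (g.getD b PySem.Dict.empty).getD c 0
      match best with
      | none => some (cost, c)
      | some bc => if bc.1 > cost then some (cost, c) else best
    else best) none

-- A's two extra checks after the c-loop (g[a][b] and g[b][a])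
def pvExtras (g : PySem.Dict String (PySem.Dict String Int)) (a b : String)
    (best0 : Option (Int × String)) : Option (Int × String) :=
  let best1 :=
    match (g.getD a PySem.Dict.empty).get? b with
    | some gab =>
      (match best0 with
       | none => some (gab, b)
       | some bc => if bc.1 > gab then some (gab, b) else best0)
    | none => best0
  match (g.getD b PySem.Dict.empty).get? a with
  | some gba =>
    (match best1 with
     | none => some (gba, a)
     | some bc => if bc.1 > gba then some (gba, a) else best1)
  | none => best1

-- best_chars = {c: {c: c} for c in vertices}; then the itertools.product loop
def pvBestChInit : PySem.Dict String (PySem.Dict String String) :=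
  pvVerts.foldl (fun d c => d.insert c (PySem.Dict.insert PySem.Dict.empty c c)) PySem.Dict.empty

def pvTables (g : PySem.Dict String (PySem.Dict String Int)) :
    PySem.Dict String (PySem.Dict String Int) × PySem.Dict String (PySem.Dict String String) :=
  (pvVerts.flatMap (fun a => pvVerts.map (fun b => (a, b)))).foldl
    (fun acc ab =>
      if ab.1 == ab.2 then acc
      else
        match pvExtras g ab.1 ab.2 (pvScan g ab.1 ab.2) with
        | none => acc
        | some mc =>
          (acc.1.modify ab.1 PySem.Dict.empty (fun inner => inner.insert ab.2 mc.1),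
           acc.2.modify ab.1 PySem.Dict.empty (fun inner => inner.insert ab.2 mc.2)))
    (pvG0, pvBestChInit)

-- for (a, b) in zip(s, t): … (early 'return -1, None' ⇒ recursion); ''.join at the end
def pvLoopA (bc : PySem.Dict String (PySem.Dict String Int))
    (bch : PySem.Dict String (PySem.Dict String String)) :
    List (String × String) → Int → List String → Int × Option String
  | [], tot, chars => (tot, some (PySem.Str.join "" chars))
  | ab :: rest, tot, chars =>
    match (bc.getD ab.1 PySem.Dict.empty).get? ab.2 with
    | none => (-1, none)
    | some m =>
      pvLoopA bc bch rest (tot + m)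
        (chars ++ [(bch.getD ab.1 PySem.Dict.empty).getD ab.2 ""])

def minimum_cost_to_make_identical_strings (s : String) (t : String) (n : Int) (changes : List (String × String × Int)) : Int × Option String :=
  if PySem.Str.len s ≠ PySem.Str.len t then (-1, none)
  else
    let g := pvBuild changes
    let bt := pvTables g
    pvLoopA bt.1 bt.2 ((s.toList.zip t.toList).map (fun p => (String.ofList [p.1], String.ofList [p.2]))) 0 []

-- ===== PORT B =====

-- dist[i][j] of Source B (a 26×26 list of lists; none = Python's None)
def pvMGet (m : List (List (Option Int))) (i j : Nat) : Option Int := (m.getD i []).getD j none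
def pvMSet (m : List (List (Option Int))) (i j : Nat) (x : Int) : List (List (Option Int)) :=
  m.set i ((m.getD i []).set j (some x))
def pvMInit : List (List (Option Int)) :=
  (List.range 26).map (fun i => (List.range 26).map (fun j => if i = j then some (0 : Int) else none))

-- edge loop of Source B; a change whose source is not a single char is skipped (Python raises on
-- ord there; such inputs are outside Pre_)
def pvMEdge (m : List (List (Option Int))) (x : String × String × Int) : List (List (Option Int)) :=
  match x.1.toList with
  | [cu] =>
    let i : Nat := cu.toNat - 97
    (match x.2.1.toList with
     | [cv] =>
       let j : Int := (cv.toNat : Int) - 97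
       if 0 ≤ j ∧ j < 26 then
         match pvMGet m i j.toNat with
         | none => pvMSet m i j.toNat x.2.2
         | some cur => if cur > x.2.2 then pvMSet m i j.toNat x.2.2 else m
       else m
     | _ => m)
  | _ => m

def pvMFW (m0 : List (List (Option Int))) : List (List (Option Int)) :=
  (List.range 26).foldl (fun m p =>
    (List.range 26).foldl (fun m u =>
      if pvMGet m u p = none then m
      else
        (List.range 26).foldl (fun m v =>
          match pvMGet m p v with
          | none => m
          | some dpv =>
            match pvMGet m u v with
            | none => pvMSet m u v ((pvMGet m u p).getD 0 + dpv)
            | some duv =>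
              if duv > (pvMGet m u p).getD 0 + dpv
              then pvMSet m u v ((pvMGet m u p).getD 0 + dpv) else m) m) m) m0

-- 'for c in range(26)' of Source B's final loop; best = (cost, letter index)
def pvMScan (m : List (List (Option Int))) (ia ib : Nat) : Option (Int × Nat) :=
  (List.range 26).foldl (fun best c =>
    match pvMGet m ia c, pvMGet m ib c with
    | some x, some y =>
      (match best with
       | none => some (x + y, c)
       | some bc => if bc.1 > x + y then some (x + y, c) else best)
    | _, _ => best) none

def pvLoopB (m : List (List (Option Int))) :
    List (Char × Char) → Int → List String → Int × Option String
  | [], tot, chars => (tot, some (PySem.Str.join "" chars))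
  | ab :: rest, tot, chars =>
    if ab.1 = ab.2 then pvLoopB m rest tot (chars ++ [String.ofList [ab.1]])
    else
      let ib : Int := (ab.2.toNat : Int) - 97
      if 0 ≤ ib ∧ ib < 26 then
        match pvMScan m (ab.1.toNat - 97) ib.toNat with
        | none => (-1, none)
        | some bc => pvLoopB m rest (tot + bc.1) (chars ++ [String.ofList [Char.ofNat (97 + bc.2)]])
      else (-1, none)

def minimum_cost_to_make_identical_strings_alt (s : String) (t : String) (n : Int) (changes : List (String × String × Int)) : Int × Option String :=
  if PySem.Str.len s ≠ PySem.Str.len t then (-1, none)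
  else pvLoopB (pvMFW (changes.foldl pvMEdge pvMInit)) (s.toList.zip t.toList) 0 []

-- ===== PRECONDITION & SPEC =====
-- When the lengths match, Pre_ requires every character of s and every change source to be a
-- lowercase letter: outside that A raises KeyError on its g[u] / best_costs[a] lookups —
-- except that when an unreachable pair precedes the offending position of s, A (and B alike)
-- returns (-1, None) early.
def Pre_minimum_cost_to_make_identical_strings (s : String) (t : String) (n : Int) (changes : List (String × String × Int)) : Prop :=
  PySem.Str.len s = PySem.Str.len t →
    ((s.toList.all (fun c => pvAlpha.contains c)) = true ∧
     (changes.all (fun x => pvVerts.contains x.1)) = true)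
instance (s : String) (t : String) (n : Int) (changes : List (String × String × Int)) : Decidable (Pre_minimum_cost_to_make_identical_strings s t n changes) := by unfold Pre_minimum_cost_to_make_identical_strings; infer_instance

def pvWitness_minimum_cost_to_make_identical_strings : String × String × Int × (List (String × String × Int)) :=
  ("ab", "ba", 0, [("a", "b", 3), ("b", "a", 1)])

def Spec_minimum_cost_to_make_identical_strings (s : String) (t : String) (n : Int) (changes : List (String × String × Int)) (out : Int × Option String) : Prop := out = minimum_cost_to_make_identical_strings_alt s t n changes
instance (s : String) (t : String) (n : Int) (changes : List (String × String × Int)) (out : Int × Option String) : Decidable (Spec_minimum_cost_to_make_identical_strings s t n changes out) := by unfold Spec_minimum_cost_to_make_identical_strings; infer_instance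

-- ===== CLAIM (what is proved, stated in full; the proofs are below) =====
def Claim_equal_minimum_cost_to_make_identical_strings : Prop := ∀ (s : String) (t : String) (n : Int) (changes : List (String × String × Int)), Dom_minimum_cost_to_make_identical_strings s t n changes → Pre_minimum_cost_to_make_identical_strings s t n changes → Spec_minimum_cost_to_make_identical_strings s t n changes (minimum_cost_to_make_identical_strings s t n changes)

-- ===== LEMMAS AND PROOFS =====

-- ---------- A-side: the best tables are exactly pvScan (extras are redundant) ----------

def pvDiagOK (g : PySem.Dict String (PySem.Dict String Int)) : Prop :=
  ∀ c ∈ pvVerts, ((g.getD c PySem.Dict.empty).get? c).any (fun x => decide (x ≤ 0)) = true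

theorem pvDiag_insert (g : PySem.Dict String (PySem.Dict String Int)) (u v : String) (w : Int)
    (h : pvDiagOK g) (gu : PySem.Dict String Int) (hgu : g.getD u PySem.Dict.empty = gu)
    (hw : ∀ x, u = v → gu.get? u = some x → x ≤ 0 → w ≤ 0) :
    pvDiagOK (g.insert u (gu.insert v w)) := by
  intro c hc
  have hd := h c hc
  rw [PySem.Dict.getD_insert]
  by_cases hcu : c = u
  · subst hcu
    rw [if_pos rfl, PySem.Dict.get?_insert]
    rw [hgu] at hd
    by_cases hcv : c = v
    · subst hcv
      rw [if_pos rfl]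
      cases hgue : gu.get? c with
      | none => rw [hgue] at hd; simp at hd
      | some x =>
        rw [hgue] at hd
        simp only [Option.any_some, decide_eq_true_eq] at hd ⊢
        exact hw x rfl hgue hd
    · rw [if_neg hcv]; exact hd
  · rw [if_neg hcu]; exact hd

theorem pvDiag_addEdge (g : PySem.Dict String (PySem.Dict String Int)) (x : String × String × Int)
    (h : pvDiagOK g) : pvDiagOK (pvAddEdge g x) := by
  unfold pvAddEdge
  cases hg : g.get? x.1 with
  | none => exact h
  | some gu =>
    have hgd : g.getD x.1 PySem.Dict.empty = gu := PySem.Dict.getD_of_get?_eq_some _ _ hg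
    dsimp only
    cases hguv : gu.get? x.2.1 with
    | none =>
      dsimp only
      refine pvDiag_insert g x.1 x.2.1 x.2.2 h gu hgd ?_
      intro y hev hy _; rw [hev] at hy; rw [hy] at hguv; cases hguv
    | some w =>
      dsimp only
      by_cases hgt : w > x.2.2
      · rw [if_pos hgt]
        refine pvDiag_insert g x.1 x.2.1 x.2.2 h gu hgd ?_
        intro y hev hy hy0
        rw [hev] at hy; rw [hy] at hguv
        injection hguv with he; omega
      · rw [if_neg hgt]; exact h

theorem pvDiag_relax (p u v : String) (g : PySem.Dict String (PySem.Dict String Int))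
    (h : pvDiagOK g) : pvDiagOK (pvRelax p u v g) := by
  unfold pvRelax
  cases hpv : (g.getD p PySem.Dict.empty).get? v with
  | none => exact h
  | some gpv =>
    dsimp only
    cases huv : (g.getD u PySem.Dict.empty).get? v with
    | none =>
      dsimp only
      refine pvDiag_insert g u v _ h _ rfl ?_
      intro y hev hy _; subst hev; rw [hy] at huv; cases huv
    | some guv =>
      dsimp only
      by_cases hgt : guv > (g.getD u PySem.Dict.empty).getD p 0 + gpv
      · rw [if_pos hgt]
        refine pvDiag_insert g u v _ h _ rfl ?_
        intro y hev hy hy0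
        subst hev; rw [hy] at huv
        injection huv with he; omega
      · rw [if_neg hgt]; exact h

theorem pvFoldPreserve {α β : Type} (P : α → Prop) (f : α → β → α) (l : List β) (a : α)
    (hstep : ∀ a b, P a → P (f a b)) (ha : P a) : P (l.foldl f a) := by
  induction l generalizing a with
  | nil => exact ha
  | cons x xs ih => exact ih _ (hstep _ _ ha)

theorem pvDiag_g0 : pvDiagOK pvG0 := by unfold pvDiagOK; decide

theorem pvDiag_build (changes : List (String × String × Int)) : pvDiagOK (pvBuild changes) := by
  unfold pvBuild pvFw
  refine pvFoldPreserve pvDiagOK _ _ _ (fun g p hg => ?_) ?_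
  · refine pvFoldPreserve pvDiagOK _ _ _ (fun g' u hg' => ?_) hg
    split
    · exact pvFoldPreserve pvDiagOK _ _ _ (fun g'' v hg'' => pvDiag_relax p u v g'' hg'') hg'
    · exact hg'
  · exact pvFoldPreserve pvDiagOK _ _ _ (fun g x hg => pvDiag_addEdge g x hg) pvDiag_g0

theorem pvScan_go_none_iff (g : PySem.Dict String (PySem.Dict String Int)) (a b : String)
    (cs : List String) (acc : Option (Int × String)) :
    (cs.foldl (fun best c =>
      if (((g.getD a PySem.Dict.empty).get? c).isSome && ((g.getD b PySem.Dict.empty).get? c).isSome) then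
        let cost : Int := (g.getD a PySem.Dict.empty).getD c 0 + (g.getD b PySem.Dict.empty).getD c 0
        match best with
        | none => some (cost, c)
        | some bc => if bc.1 > cost then some (cost, c) else best
      else best) acc) = none ↔
    acc = none ∧ ∀ c ∈ cs, ¬(((g.getD a PySem.Dict.empty).get? c).isSome = true ∧ ((g.getD b PySem.Dict.empty).get? c).isSome = true) := by
  induction cs generalizing acc with
  | nil => simp
  | cons c cs ih =>
    rw [List.foldl_cons, ih]
    constructor
    · rintro ⟨hstep, hall⟩
      by_cases hq : (((g.getD a PySem.Dict.empty).get? c).isSome && ((g.getD b PySem.Dict.empty).get? c).isSome) = true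
      · exfalso
        rw [if_pos hq] at hstep
        cases acc <;> simp at hstep
        split at hstep <;> cases hstep
      · rw [if_neg hq] at hstep
        refine ⟨hstep, ?_⟩
        intro c' hc'
        rcases List.mem_cons.mp hc' with rfl | h2
        · simpa using hq
        · exact hall _ h2
    · rintro ⟨hacc, hall⟩
      have hq : ¬((((g.getD a PySem.Dict.empty).get? c).isSome && ((g.getD b PySem.Dict.empty).get? c).isSome) = true) := by
        simpa using hall c (List.mem_cons_self ..)
      rw [if_neg hq]
      exact ⟨hacc, fun c' hc' => hall c' (List.mem_cons_of_mem _ hc')⟩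

theorem pvScan_go_min (g : PySem.Dict String (PySem.Dict String Int)) (a b : String)
    (cs : List String) (acc : Option (Int × String)) (m : Int) (ch : String)
    (hres : (cs.foldl (fun best c =>
      if (((g.getD a PySem.Dict.empty).get? c).isSome && ((g.getD b PySem.Dict.empty).get? c).isSome) then
        let cost : Int := (g.getD a PySem.Dict.empty).getD c 0 + (g.getD b PySem.Dict.empty).getD c 0
        match best with
        | none => some (cost, c)
        | some bc => if bc.1 > cost then some (cost, c) else best
      else best) acc) = some (m, ch)) :
    (∀ c ∈ cs, (((g.getD a PySem.Dict.empty).get? c).isSome ∧ ((g.getD b PySem.Dict.empty).get? c).isSome) →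
        m ≤ (g.getD a PySem.Dict.empty).getD c 0 + (g.getD b PySem.Dict.empty).getD c 0) ∧
    (∀ m0 ch0, acc = some (m0, ch0) → m ≤ m0) := by
  induction cs generalizing acc with
  | nil =>
    simp only [List.foldl_nil] at hres
    exact ⟨by simp, by intro m0 ch0 h; rw [h] at hres; injection hres with h'; injection h' with h1 _; omega⟩
  | cons c cs ih =>
    rw [List.foldl_cons] at hres
    obtain ⟨ihall, ihacc⟩ := ih _ hres
    by_cases hq : (((g.getD a PySem.Dict.empty).get? c).isSome && ((g.getD b PySem.Dict.empty).get? c).isSome) = true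
    · rw [if_pos hq] at ihacc
      have hkey : m ≤ (g.getD a PySem.Dict.empty).getD c 0 + (g.getD b PySem.Dict.empty).getD c 0 ∧
          (∀ m0 ch0, acc = some (m0, ch0) → m ≤ m0) := by
        cases acc with
        | none =>
          exact ⟨ihacc _ _ rfl, by intro m0 ch0 h; cases h⟩
        | some bc =>
          obtain ⟨b1, b2⟩ := bc
          by_cases hlt : b1 > (g.getD a PySem.Dict.empty).getD c 0 + (g.getD b PySem.Dict.empty).getD c 0
          · have h1 := ihacc ((g.getD a PySem.Dict.empty).getD c 0 + (g.getD b PySem.Dict.empty).getD c 0) c (by simp [hlt])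
            exact ⟨h1, by intro m0 ch0 h; injection h with h'; injection h' with e1 e2; omega⟩
          · have h1 := ihacc b1 b2 (by simp [hlt])
            exact ⟨by omega, by intro m0 ch0 h; injection h with h'; injection h' with e1 e2; omega⟩
      refine ⟨?_, hkey.2⟩
      intro c' hc' hq'
      rcases List.mem_cons.mp hc' with rfl | h2
      · exact hkey.1
      · exact ihall _ h2 hq'
    · rw [if_neg hq] at ihacc
      refine ⟨?_, ihacc⟩
      intro c' hc' hq'
      rcases List.mem_cons.mp hc' with rfl | h2
      · exact absurd (by simp [hq'.1, hq'.2]) hq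
      · exact ihall _ h2 hq'

theorem pvDiag_some (g : PySem.Dict String (PySem.Dict String Int)) (c : String)
    (hc : c ∈ pvVerts) (hd : pvDiagOK g) :
    ∃ x, (g.getD c PySem.Dict.empty).get? c = some x ∧ x ≤ 0 := by
  have h := hd c hc
  cases hx : (g.getD c PySem.Dict.empty).get? c with
  | none => rw [hx] at h; cases h
  | some x =>
    rw [hx] at h
    simp only [Option.any_some, decide_eq_true_eq] at h
    exact ⟨x, rfl, h⟩

theorem pvExtras_eq_scan (g : PySem.Dict String (PySem.Dict String Int)) (a b : String)
    (ha : a ∈ pvVerts) (hb : b ∈ pvVerts) (hd : pvDiagOK g) :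
    pvExtras g a b (pvScan g a b) = pvScan g a b := by
  obtain ⟨xa, hxa, hxa0⟩ := pvDiag_some g a ha hd
  obtain ⟨xb, hxb, hxb0⟩ := pvDiag_some g b hb hd
  have hS : pvScan g a b = pvVerts.foldl (fun best c =>
      if (((g.getD a PySem.Dict.empty).get? c).isSome && ((g.getD b PySem.Dict.empty).get? c).isSome) then
        let cost : Int := (g.getD a PySem.Dict.empty).getD c 0 + (g.getD b PySem.Dict.empty).getD c 0
        match best with
        | none => some (cost, c)
        | some bc => if bc.1 > cost then some (cost, c) else best
      else best) none := rfl
  unfold pvExtras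
  have hbest1 : (match (g.getD a PySem.Dict.empty).get? b with
    | some gab =>
      (match pvScan g a b with
       | none => some (gab, b)
       | some bc => if bc.1 > gab then some (gab, b) else pvScan g a b)
    | none => pvScan g a b) = pvScan g a b := by
    cases hab : (g.getD a PySem.Dict.empty).get? b with
    | none => rfl
    | some gab =>
      cases hscan : pvScan g a b with
      | none =>
        exfalso
        rw [hS] at hscan
        have := (pvScan_go_none_iff g a b pvVerts none).mp hscan
        exact this.2 b hb ⟨by simp [hab], by simp [hxb]⟩
      | some mc =>
        obtain ⟨m, ch⟩ := mc
        have hmin := pvScan_go_min g a b pvVerts none m ch (by rw [← hS]; exact hscan)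
        have hle := hmin.1 b hb ⟨by simp [hab], by simp [hxb]⟩
        rw [PySem.Dict.getD_of_get?_eq_some _ _ hab, PySem.Dict.getD_of_get?_eq_some _ _ hxb] at hle
        have : ¬(m > gab) := by omega
        simp [this]
  rw [hbest1]
  cases hba : (g.getD b PySem.Dict.empty).get? a with
  | none => rfl
  | some gba =>
    cases hscan : pvScan g a b with
    | none =>
      exfalso
      rw [hS] at hscan
      have := (pvScan_go_none_iff g a b pvVerts none).mp hscan
      exact this.2 a ha ⟨by simp [hxa], by simp [hba]⟩
    | some mc =>
      obtain ⟨m, ch⟩ := mc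
      have hmin := pvScan_go_min g a b pvVerts none m ch (by rw [← hS]; exact hscan)
      have hle := hmin.1 a ha ⟨by simp [hxa], by simp [hba]⟩
      rw [PySem.Dict.getD_of_get?_eq_some _ _ hxa, PySem.Dict.getD_of_get?_eq_some _ _ hba] at hle
      have : ¬(m > gba) := by omega
      simp [this]

theorem pvInitLookup {ν : Type} (f : String → ν) (L : List String)
    (d : PySem.Dict String (PySem.Dict String ν)) (a b : String) :
    (((L.foldl (fun d c => d.insert c (PySem.Dict.insert PySem.Dict.empty c (f c))) d).getD a PySem.Dict.empty).get? b)
      = if a ∈ L then (if b = a then some (f a) else none) else ((d.getD a PySem.Dict.empty).get? b) := by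
  induction L generalizing d with
  | nil => simp
  | cons c cs ih =>
    rw [List.foldl_cons, ih]
    by_cases hacs : a ∈ cs
    · rw [if_pos hacs, if_pos (List.mem_cons_of_mem _ hacs)]
    · rw [if_neg hacs]
      by_cases hac : a = c
      · subst hac
        rw [if_pos (List.mem_cons_self ..), PySem.Dict.getD_insert, if_pos rfl, PySem.Dict.get?_insert]
        by_cases hba : b = a
        · subst hba; rw [if_pos rfl, if_pos rfl]
        · rw [if_neg hba, if_neg hba, PySem.Dict.get?_empty]
      · rw [if_neg (by simp [hac, hacs]), PySem.Dict.getD_insert, if_neg hac]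

theorem pvFoldWrites {ν : Type} (f : String × String → Option ν)
    (step : PySem.Dict String (PySem.Dict String ν) → String × String → PySem.Dict String (PySem.Dict String ν))
    (hstep : ∀ acc ab, step acc ab =
      if ab.1 == ab.2 then acc
      else match f ab with
        | none => acc
        | some v => acc.modify ab.1 PySem.Dict.empty (fun inner => inner.insert ab.2 v))
    (P : List (String × String)) (hnd : P.Nodup)
    (d : PySem.Dict String (PySem.Dict String ν)) (a b : String) :
    (((P.foldl step d).getD a PySem.Dict.empty).get? b)
      = if (a, b) ∈ P ∧ a ≠ b ∧ (f (a, b)).isSome then f (a, b)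
        else ((d.getD a PySem.Dict.empty).get? b) := by
  induction P generalizing d with
  | nil => simp
  | cons hd0 tl ih =>
    have hnd' : tl.Nodup := hnd.of_cons
    have hnotm : hd0 ∉ tl := (List.nodup_cons.mp hnd).1
    rw [List.foldl_cons, ih hnd']
    by_cases htl : (a, b) ∈ tl ∧ a ≠ b ∧ (f (a, b)).isSome
    · rw [if_pos htl, if_pos ⟨List.mem_cons_of_mem _ htl.1, htl.2⟩]
    · rw [if_neg htl]
      by_cases hne : hd0 = (a, b)
      · subst hne
        have hnmem : (a, b) ∉ tl := hnotm
        rw [hstep]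
        by_cases hab : a = b
        · subst hab
          rw [if_pos (by simp : ((a, a).1 == (a, a).2) = true)]
          rw [if_neg (by rintro ⟨-, h, -⟩; exact h rfl)]
        · rw [if_neg (by simpa using hab)]
          cases hf : f (a, b) with
          | none =>
            rw [if_neg (by rintro ⟨-, -, h⟩; simp at h)]
          | some v =>
            rw [if_pos ⟨List.mem_cons_self .., hab, rfl⟩]
            rw [PySem.Dict.getD_modify, if_pos rfl, PySem.Dict.get?_insert, if_pos rfl]
      · have hcell : (((step d hd0).getD a PySem.Dict.empty).get? b)
              = ((d.getD a PySem.Dict.empty).get? b) := by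
          rw [hstep]
          by_cases heq : hd0.1 == hd0.2
          · rw [if_pos heq]
          · rw [if_neg heq]
            cases hf : f hd0 with
            | none => rfl
            | some v =>
              by_cases h1 : a = hd0.1
              · subst h1
                rw [PySem.Dict.getD_modify, if_pos rfl, PySem.Dict.get?_insert]
                have h2 : b ≠ hd0.2 := by
                  intro hb; subst hb; exact hne rfl
                rw [if_neg h2]
              · rw [PySem.Dict.getD_modify, if_neg h1]
        rw [hcell]
        exact (if_neg (fun hcon => (List.mem_cons.mp hcon.1).elim (fun h => hne h.symm) (fun h => htl ⟨h, hcon.2⟩))).symm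

theorem pvVertsNodup : pvVerts.Nodup := by decide
theorem pvPairsNodup : (pvVerts.flatMap (fun a => pvVerts.map (fun b => (a, b)))).Nodup :=
  List.Nodup.product pvVertsNodup pvVertsNodup
theorem pvMemPairs (a b : String) (ha : a ∈ pvVerts) (hb : b ∈ pvVerts) :
    (a, b) ∈ pvVerts.flatMap (fun a => pvVerts.map (fun b => (a, b))) :=
  List.mem_flatMap.mpr ⟨a, ha, List.mem_map.mpr ⟨b, hb, rfl⟩⟩

def pvBodyC (g : PySem.Dict String (PySem.Dict String Int)) :
    PySem.Dict String (PySem.Dict String Int) → String × String → PySem.Dict String (PySem.Dict String Int) :=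
  fun acc ab =>
    if ab.1 == ab.2 then acc
    else match (pvExtras g ab.1 ab.2 (pvScan g ab.1 ab.2)).map (·.1) with
      | none => acc
      | some v => acc.modify ab.1 PySem.Dict.empty (fun inner => inner.insert ab.2 v)

def pvBodyCh (g : PySem.Dict String (PySem.Dict String Int)) :
    PySem.Dict String (PySem.Dict String String) → String × String → PySem.Dict String (PySem.Dict String String) :=
  fun acc ab =>
    if ab.1 == ab.2 then acc
    else match (pvExtras g ab.1 ab.2 (pvScan g ab.1 ab.2)).map (·.2) with
      | none => acc
      | some v => acc.modify ab.1 PySem.Dict.empty (fun inner => inner.insert ab.2 v)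

theorem pvTables_eq_pair (g : PySem.Dict String (PySem.Dict String Int)) :
    pvTables g =
      ((pvVerts.flatMap (fun a => pvVerts.map (fun b => (a, b)))).foldl (pvBodyC g) pvG0,
       (pvVerts.flatMap (fun a => pvVerts.map (fun b => (a, b)))).foldl (pvBodyCh g) pvBestChInit) := by
  have h1 : pvTables g = (pvVerts.flatMap (fun a => pvVerts.map (fun b => (a, b)))).foldl
      (fun s e => (pvBodyC g s.1 e, pvBodyCh g s.2 e)) (pvG0, pvBestChInit) := by
    unfold pvTables
    congr 1
    funext s e
    unfold pvBodyC pvBodyCh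
    by_cases heq : e.1 == e.2
    · simp [heq]
    · simp only [heq, Bool.false_eq_true, if_false]
      cases hE : pvExtras g e.1 e.2 (pvScan g e.1 e.2) with
      | none => rfl
      | some mc => rfl
  rw [h1, PySem.List.foldl_prod_mk]

theorem pvG0_lookup (a b : String) :
    ((pvG0.getD a PySem.Dict.empty).get? b) = if a ∈ pvVerts then (if b = a then some (0 : Int) else none) else none := by
  have h := pvInitLookup (fun _ => (0 : Int)) pvVerts PySem.Dict.empty a b
  beta_reduce at h
  unfold pvG0
  rw [h]
  by_cases ha : a ∈ pvVerts
  · rw [if_pos ha, if_pos ha]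
  · rw [if_neg ha, if_neg ha, PySem.Dict.getD_empty, PySem.Dict.get?_empty]

theorem pvBestChInit_lookup (a b : String) :
    ((pvBestChInit.getD a PySem.Dict.empty).get? b) = if a ∈ pvVerts then (if b = a then some a else none) else none := by
  have h := pvInitLookup (fun c => c) pvVerts PySem.Dict.empty a b
  beta_reduce at h
  unfold pvBestChInit
  rw [h]
  by_cases ha : a ∈ pvVerts
  · rw [if_pos ha, if_pos ha]
  · rw [if_neg ha, if_neg ha, PySem.Dict.getD_empty, PySem.Dict.get?_empty]

theorem pvTables_cost (g : PySem.Dict String (PySem.Dict String Int)) (a b : String)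
    (ha : a ∈ pvVerts) (hb : b ∈ pvVerts) (hd : pvDiagOK g) :
    (((pvTables g).1.getD a PySem.Dict.empty).get? b)
      = if a = b then some 0 else (pvScan g a b).map (·.1) := by
  rw [pvTables_eq_pair]
  dsimp only
  have hw := pvFoldWrites (f := fun ab => (pvExtras g ab.1 ab.2 (pvScan g ab.1 ab.2)).map (·.1))
    (step := pvBodyC g)
    (hstep := by
      intro acc ab
      unfold pvBodyC
      beta_reduce
      cases (pvExtras g ab.1 ab.2 (pvScan g ab.1 ab.2)).map (·.1) <;> rfl)
    (P := pvVerts.flatMap (fun a => pvVerts.map (fun b => (a, b)))) pvPairsNodup pvG0 a b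
  rw [hw, pvG0_lookup, if_pos ha]
  dsimp only
  rw [pvExtras_eq_scan g a b ha hb hd]
  by_cases hab : a = b
  · subst hab; simp
  · have hab' : ¬b = a := fun h => hab h.symm
    have hmem := pvMemPairs a b ha hb
    by_cases hs : ((pvScan g a b).map (·.1)).isSome
    · simp [hab, hmem, hs]
    · have hnone : (pvScan g a b).map (·.1) = none := by
        cases hsc : pvScan g a b
        · rfl
        · rw [hsc] at hs; simp at hs
      simp [hab, hab', hnone]

theorem pvTables_char (g : PySem.Dict String (PySem.Dict String Int)) (a b : String)
    (ha : a ∈ pvVerts) (hb : b ∈ pvVerts) (hd : pvDiagOK g) :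
    (((pvTables g).2.getD a PySem.Dict.empty).get? b)
      = if a = b then some a else (pvScan g a b).map (·.2) := by
  rw [pvTables_eq_pair]
  dsimp only
  have hw := pvFoldWrites (f := fun ab => (pvExtras g ab.1 ab.2 (pvScan g ab.1 ab.2)).map (·.2))
    (step := pvBodyCh g)
    (hstep := by
      intro acc ab
      unfold pvBodyCh
      beta_reduce
      cases (pvExtras g ab.1 ab.2 (pvScan g ab.1 ab.2)).map (·.2) <;> rfl)
    (P := pvVerts.flatMap (fun a => pvVerts.map (fun b => (a, b)))) pvPairsNodup pvBestChInit a b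
  rw [hw, pvBestChInit_lookup, if_pos ha]
  dsimp only
  rw [pvExtras_eq_scan g a b ha hb hd]
  by_cases hab : a = b
  · subst hab; simp
  · have hab' : ¬b = a := fun h => hab h.symm
    have hmem := pvMemPairs a b ha hb
    by_cases hs : ((pvScan g a b).map (·.2)).isSome
    · simp [hab, hmem, hs]
    · have hnone : (pvScan g a b).map (·.2) = none := by
        cases hsc : pvScan g a b
        · rfl
        · rw [hsc] at hs; simp at hs
      simp [hab, hab', hnone]

-- cost-table cell is empty when the target string is not a vertex
theorem pvTables_cost_none (g : PySem.Dict String (PySem.Dict String Int)) (a b : String)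
    (ha : a ∈ pvVerts) (hb : b ∉ pvVerts) :
    (((pvTables g).1.getD a PySem.Dict.empty).get? b) = none := by
  rw [pvTables_eq_pair]
  dsimp only
  have hw := pvFoldWrites (f := fun ab => (pvExtras g ab.1 ab.2 (pvScan g ab.1 ab.2)).map (·.1))
    (step := pvBodyC g)
    (hstep := by
      intro acc ab
      unfold pvBodyC
      beta_reduce
      cases (pvExtras g ab.1 ab.2 (pvScan g ab.1 ab.2)).map (·.1) <;> rfl)
    (P := pvVerts.flatMap (fun a => pvVerts.map (fun b => (a, b)))) pvPairsNodup pvG0 a b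
  rw [hw, if_neg, pvG0_lookup, if_pos ha, if_neg]
  · intro hba; exact hb (hba ▸ ha)
  · rintro ⟨hmem, -, -⟩
    rcases List.mem_flatMap.mp hmem with ⟨a', -, hmem2⟩
    rcases List.mem_map.mp hmem2 with ⟨b', hb', heq⟩
    injection heq with h1 h2
    exact hb (h2 ▸ hb')

-- ---------- character/index correspondence ----------

def pvBVert (i : Nat) : String := String.ofList [Char.ofNat (97 + i)]

theorem pvAlpha_eq : pvAlpha = (List.range 26).map (fun i => Char.ofNat (97 + i)) := by decide

theorem pvVerts_eq : pvVerts = (List.range 26).map pvBVert := by decide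

theorem pvBVert_toNat : ∀ i < 26, (Char.ofNat (97 + i)).toNat = 97 + i := by decide

theorem pvMem_pvAlpha_iff (c : Char) : c ∈ pvAlpha ↔ 97 ≤ c.toNat ∧ c.toNat ≤ 122 := by
  rw [pvAlpha_eq]
  constructor
  · intro h
    rcases List.mem_map.mp h with ⟨i, hi, rfl⟩
    have hi' := List.mem_range.mp hi
    have := pvBVert_toNat i hi'
    omega
  · rintro ⟨h1, h2⟩
    refine List.mem_map.mpr ⟨c.toNat - 97, List.mem_range.mpr (by omega), ?_⟩
    have : 97 + (c.toNat - 97) = c.toNat := by omega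
    rw [this, Char.ofNat_toNat]

theorem pvChar_idx (c : Char) (h : c ∈ pvAlpha) :
    c.toNat - 97 < 26 ∧ String.ofList [c] = pvBVert (c.toNat - 97) := by
  obtain ⟨h1, h2⟩ := (pvMem_pvAlpha_iff c).mp h
  refine ⟨by omega, ?_⟩
  unfold pvBVert
  have : 97 + (c.toNat - 97) = c.toNat := by omega
  rw [this, Char.ofNat_toNat]

theorem pvBVert_mem (i : Nat) (h : i < 26) : pvBVert i ∈ pvVerts := by
  rw [pvVerts_eq]; exact List.mem_map.mpr ⟨i, List.mem_range.mpr h, rfl⟩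

theorem pvMem_pvVerts_iff (x : String) : x ∈ pvVerts ↔ ∃ i, i < 26 ∧ x = pvBVert i := by
  rw [pvVerts_eq]
  constructor
  · intro h
    rcases List.mem_map.mp h with ⟨i, hi, rfl⟩
    exact ⟨i, List.mem_range.mp hi, rfl⟩
  · rintro ⟨i, hi, rfl⟩
    exact List.mem_map.mpr ⟨i, List.mem_range.mpr hi, rfl⟩

theorem pvOfList_inj (a b : Char) (h : String.ofList [a] = String.ofList [b]) : a = b := by
  have := congrArg String.toList h
  simpa [String.toList_ofList] using this

-- ---------- the matrix/dict simulation relation ----------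

def pvRel (g : PySem.Dict String (PySem.Dict String Int)) (m : List (List (Option Int))) : Prop :=
  m.length = 26 ∧ (∀ k, k < 26 → (m.getD k []).length = 26) ∧
  (∀ i, i < 26 → (g.get? (pvBVert i)).isSome = true) ∧
  (∀ i, i < 26 → ∀ j, j < 26 →
    pvMGet m i j = (g.getD (pvBVert i) PySem.Dict.empty).get? (pvBVert j))

theorem pvBVert_inj : ∀ i < 26, ∀ j < 26, pvBVert i = pvBVert j → i = j := by decide

theorem pvMGet_set (m : List (List (Option Int))) (i j i' j' : Nat) (w : Int)
    (hlen : m.length = 26) (hrow : ∀ k, k < 26 → (m.getD k []).length = 26)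
    (hi : i < 26) (hj : j < 26) :
    pvMGet (pvMSet m i j w) i' j' = if i' = i ∧ j' = j then some w else pvMGet m i' j' := by
  unfold pvMGet pvMSet
  have hr : (m[i]?.getD []).length = 26 := by
    have := hrow i hi; rwa [List.getD_eq_getElem?_getD] at this
  simp only [List.getD_eq_getElem?_getD]
  rw [List.getElem?_set]
  by_cases hii : i = i'
  · subst hii
    rw [if_pos rfl, if_pos (by omega), Option.getD_some, List.getElem?_set]
    by_cases hjj : j = j'
    · subst hjj
      rw [if_pos rfl, if_pos (by rw [hr]; omega), if_pos ⟨rfl, rfl⟩, Option.getD_some]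
    · rw [if_neg hjj, if_neg (by rintro ⟨-, h⟩; exact hjj h.symm)]
  · rw [if_neg hii, if_neg (by rintro ⟨h, -⟩; exact hii h.symm)]

theorem pvRel_set (g : PySem.Dict String (PySem.Dict String Int))
    (gu : PySem.Dict String Int) (m : List (List (Option Int))) (i j : Nat) (w : Int)
    (hi : i < 26) (hj : j < 26) (hrel : pvRel g m)
    (hgu : g.get? (pvBVert i) = some gu) :
    pvRel (g.insert (pvBVert i) (gu.insert (pvBVert j) w)) (pvMSet m i j w) := by
  obtain ⟨hlen, hrow, hrows, hcell⟩ := hrel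
  refine ⟨by simp [pvMSet, hlen], ?_, ?_, ?_⟩
  · intro k hk
    unfold pvMSet
    have hr := hrow k hk
    simp only [List.getD_eq_getElem?_getD] at hr ⊢
    rw [List.getElem?_set]
    by_cases hik : i = k
    · subst hik
      rw [if_pos rfl, if_pos (by omega), Option.getD_some, List.length_set]
      exact hr
    · rw [if_neg hik]
      exact hr
  · intro i' hi'
    rw [PySem.Dict.get?_insert]
    by_cases h : pvBVert i' = pvBVert i
    · rw [if_pos h]; rfl
    · rw [if_neg h]; exact hrows i' hi'
  · intro i' hi' j' hj'
    rw [pvMGet_set m i j i' j' w hlen hrow hi hj]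
    have hgud : g.getD (pvBVert i) PySem.Dict.empty = gu :=
      PySem.Dict.getD_of_get?_eq_some _ _ hgu
    by_cases hii : i' = i
    · subst hii
      rw [PySem.Dict.getD_insert, if_pos rfl, PySem.Dict.get?_insert]
      by_cases hjj : j' = j
      · subst hjj
        rw [if_pos rfl, if_pos ⟨rfl, rfl⟩]
      · have hne : pvBVert j' ≠ pvBVert j := fun h => hjj (pvBVert_inj j' hj' j hj h)
        rw [if_neg hne, if_neg (by rintro ⟨-, h⟩; exact hjj h)]
        rw [hcell i' hi' j' hj', hgud]
    · have hne : pvBVert i' ≠ pvBVert i := fun h => hii (pvBVert_inj i' hi' i hi h)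
      rw [PySem.Dict.getD_insert, if_neg hne, if_neg (by rintro ⟨h, -⟩; exact hii h)]
      exact hcell i' hi' j' hj'

-- untouched vertex cells of a row insertion with a non-vertex key
theorem pvRel_insert_junk (g : PySem.Dict String (PySem.Dict String Int))
    (gu : PySem.Dict String Int) (m : List (List (Option Int))) (i : Nat) (v : String) (w : Int)
    (hi : i < 26) (hv : v ∉ pvVerts) (hrel : pvRel g m)
    (hgu : g.get? (pvBVert i) = some gu) :
    pvRel (g.insert (pvBVert i) (gu.insert v w)) m := by
  obtain ⟨hlen, hrow, hrows, hcell⟩ := hrel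
  refine ⟨hlen, hrow, ?_, ?_⟩
  · intro i' hi'
    rw [PySem.Dict.get?_insert]
    by_cases h : pvBVert i' = pvBVert i
    · rw [if_pos h]; rfl
    · rw [if_neg h]; exact hrows i' hi'
  · intro i' hi' j' hj'
    have hgud : g.getD (pvBVert i) PySem.Dict.empty = gu :=
      PySem.Dict.getD_of_get?_eq_some _ _ hgu
    rw [PySem.Dict.getD_insert]
    by_cases hii : pvBVert i' = pvBVert i
    · rw [if_pos hii]
      have hne : pvBVert j' ≠ v := fun h => hv (h ▸ pvBVert_mem j' hj')
      rw [PySem.Dict.get?_insert_of_ne _ _ hne, hcell i' hi' j' hj', hii, hgud]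
    · rw [if_neg hii]
      exact hcell i' hi' j' hj'

-- generic two-sided fold lockstep
theorem pvFoldRel {α β γ : Type} (R : α → β → Prop) (f : α → γ → α) (h : β → γ → β)
    (l : List γ) (hstep : ∀ a b c, c ∈ l → R a b → R (f a c) (h b c)) :
    ∀ a b, R a b → R (l.foldl f a) (l.foldl h b) := by
  induction l with
  | nil => intro a b hab; exact hab
  | cons x xs ih =>
    intro a b hab
    exact ih (fun a b c hc => hstep a b c (List.mem_cons_of_mem _ hc)) _ _
      (hstep a b x (List.mem_cons_self ..) hab)

theorem pvRel_init : pvRel pvG0 pvMInit := by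
  unfold pvRel; decide

theorem pvRel_edge (g : PySem.Dict String (PySem.Dict String Int)) (m : List (List (Option Int)))
    (x : String × String × Int) (hx : x.1 ∈ pvVerts) (hrel : pvRel g m) :
    pvRel (pvAddEdge g x) (pvMEdge m x) := by
  obtain ⟨i, hi, hx1⟩ := (pvMem_pvVerts_iff x.1).mp hx
  have htl : x.1.toList = [Char.ofNat (97 + i)] := by rw [hx1]; exact String.toList_ofList
  have hidx : (Char.ofNat (97 + i)).toNat - 97 = i := by
    rw [pvBVert_toNat i hi]; omega
  have hrows := hrel.2.2.1
  obtain ⟨gu, hgu⟩ := Option.isSome_iff_exists.mp (hrows i hi)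
  have hgud : g.getD (pvBVert i) PySem.Dict.empty = gu :=
    PySem.Dict.getD_of_get?_eq_some _ _ hgu
  unfold pvAddEdge pvMEdge
  rw [htl, hx1, hgu]
  dsimp only
  rw [hidx]
  by_cases hv : x.2.1 ∈ pvVerts
  · obtain ⟨j, hj, hv1⟩ := (pvMem_pvVerts_iff x.2.1).mp hv
    have hvtl : x.2.1.toList = [Char.ofNat (97 + j)] := by rw [hv1]; exact String.toList_ofList
    have hcn : (Char.ofNat (97 + j)).toNat = 97 + j := pvBVert_toNat j hj
    rw [hvtl]
    dsimp only
    have hguard : (0 ≤ ((Char.ofNat (97 + j)).toNat : Int) - 97 ∧ ((Char.ofNat (97 + j)).toNat : Int) - 97 < 26) := by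
      rw [hcn]; constructor <;> [push_cast; push_cast] <;> omega
    rw [if_pos hguard]
    have hjt : (((Char.ofNat (97 + j)).toNat : Int) - 97).toNat = j := by
      rw [hcn]; omega
    rw [hjt]
    have hc := hrel.2.2.2 i hi j hj
    rw [hgud] at hc
    rw [hc, hv1]
    cases hlk : gu.get? (pvBVert j) with
    | none => exact pvRel_set g gu m i j x.2.2 hi hj hrel hgu
    | some cur =>
      dsimp only
      by_cases hgt : cur > x.2.2
      · rw [if_pos hgt, if_pos hgt]
        exact pvRel_set g gu m i j x.2.2 hi hj hrel hgu
      · rw [if_neg hgt, if_neg hgt]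
        exact hrel
  · -- target is not a vertex: B skips; A writes a junk key into row i
    have hB : (match x.2.1.toList with
       | [cv] =>
         if 0 ≤ (cv.toNat : Int) - 97 ∧ (cv.toNat : Int) - 97 < 26 then
           match pvMGet m i ((cv.toNat : Int) - 97).toNat with
           | none => pvMSet m i ((cv.toNat : Int) - 97).toNat x.2.2
           | some cur => if cur > x.2.2 then pvMSet m i ((cv.toNat : Int) - 97).toNat x.2.2 else m
         else m
       | _ => m) = m := by
      cases hvt : x.2.1.toList with
      | nil => rfl
      | cons cv rest =>
        cases rest with
        | cons _ _ => rfl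
        | nil =>
          dsimp only
          by_cases hg : 0 ≤ (cv.toNat : Int) - 97 ∧ (cv.toNat : Int) - 97 < 26
          · exfalso
            apply hv
            have hcv : 97 ≤ cv.toNat ∧ cv.toNat ≤ 122 := by
              obtain ⟨h1, h2⟩ := hg; omega
            have hx21 : x.2.1 = String.ofList [cv] := by
              rw [← hvt, String.ofList_toList]
            rw [hx21]
            rw [pvMem_pvVerts_iff]
            refine ⟨cv.toNat - 97, by omega, ?_⟩
            unfold pvBVert
            have : 97 + (cv.toNat - 97) = cv.toNat := by omega
            rw [this, Char.ofNat_toNat]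
          · rw [if_neg hg]
    rw [hB]
    cases hlk : gu.get? x.2.1 with
    | none =>
      exact pvRel_insert_junk g gu m i x.2.1 x.2.2 hi hv hrel hgu
    | some w =>
      dsimp only
      by_cases hgt : w > x.2.2
      · rw [if_pos hgt]
        exact pvRel_insert_junk g gu m i x.2.1 x.2.2 hi hv hrel hgu
      · rw [if_neg hgt]; exact hrel

theorem pvRel_relax (g : PySem.Dict String (PySem.Dict String Int)) (m : List (List (Option Int)))
    (p u v : Nat) (hp : p < 26) (hu : u < 26) (hv : v < 26) (hrel : pvRel g m) :
    pvRel (pvRelax (pvBVert p) (pvBVert u) (pvBVert v) g)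
      (match pvMGet m p v with
       | none => m
       | some dpv =>
         match pvMGet m u v with
         | none => pvMSet m u v ((pvMGet m u p).getD 0 + dpv)
         | some duv =>
           if duv > (pvMGet m u p).getD 0 + dpv
           then pvMSet m u v ((pvMGet m u p).getD 0 + dpv) else m) := by
  have hcpv := hrel.2.2.2 p hp v hv
  have hcuv := hrel.2.2.2 u hu v hv
  have hcup := hrel.2.2.2 u hu p hp
  obtain ⟨gu, hgu⟩ := Option.isSome_iff_exists.mp (hrel.2.2.1 u hu)
  have hgud : g.getD (pvBVert u) PySem.Dict.empty = gu :=
    PySem.Dict.getD_of_get?_eq_some _ _ hgu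
  have hgup : (g.getD (pvBVert u) PySem.Dict.empty).getD (pvBVert p) 0 = (pvMGet m u p).getD 0 := by
    rw [PySem.Dict.getD_eq_get?_getD, hcup]
  unfold pvRelax
  rw [hcpv]
  cases hpv : (g.getD (pvBVert p) PySem.Dict.empty).get? (pvBVert v) with
  | none => exact hrel
  | some dpv =>
    dsimp only
    rw [hcuv]
    cases huv : (g.getD (pvBVert u) PySem.Dict.empty).get? (pvBVert v) with
    | none =>
      dsimp only
      rw [hgup, hgud]
      exact pvRel_set g gu m u v _ hu hv hrel hgu
    | some duv =>
      dsimp only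
      rw [hgup]
      by_cases hgt : duv > (pvMGet m u p).getD 0 + dpv
      · rw [if_pos hgt, if_pos hgt, hgud]
        exact pvRel_set g gu m u v _ hu hv hrel hgu
      · rw [if_neg hgt, if_neg hgt]; exact hrel

theorem pvRel_fw (g : PySem.Dict String (PySem.Dict String Int)) (m : List (List (Option Int)))
    (hrel : pvRel g m) : pvRel (pvFw g) (pvMFW m) := by
  unfold pvFw pvMFW
  rw [pvVerts_eq, List.foldl_map]
  refine pvFoldRel pvRel _ _ (List.range 26) ?_ g m hrel
  intro g m p hpmem hrel1
  have hp := List.mem_range.mp hpmem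
  rw [List.foldl_map]
  refine pvFoldRel pvRel _ _ (List.range 26) ?_ g m hrel1
  intro g m u humem hrel2
  have hu := List.mem_range.mp humem
  have hguard := hrel2.2.2.2 u hu p hp
  by_cases hnone : pvMGet m u p = none
  · rw [if_pos hnone]
    rw [hnone] at hguard
    rw [if_neg (by rw [← hguard]; simp)]
    exact hrel2
  · rw [if_neg hnone]
    rw [if_pos (by rw [← hguard]; exact Option.isSome_iff_ne_none.mpr hnone)]
    rw [List.foldl_map]
    refine pvFoldRel pvRel _ _ (List.range 26) ?_ g m hrel2
    intro g m v hvmem hrel3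
    exact pvRel_relax g m p u v hp hu (List.mem_range.mp hvmem) hrel3

theorem pvRel_build (changes : List (String × String × Int))
    (hch : (changes.all (fun x => pvVerts.contains x.1)) = true) :
    pvRel (pvBuild changes) (pvMFW (changes.foldl pvMEdge pvMInit)) := by
  unfold pvBuild
  refine pvRel_fw _ _ ?_
  refine pvFoldRel pvRel pvAddEdge pvMEdge changes ?_ pvG0 pvMInit pvRel_init
  intro g m x hx hrel
  have := List.all_eq_true.mp hch x hx
  exact pvRel_edge g m x (by simpa [List.contains_iff_mem] using this) hrel

-- the two inner minimisation scans agree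
theorem pvScan_rel (g : PySem.Dict String (PySem.Dict String Int)) (m : List (List (Option Int)))
    (ia ib : Nat) (hia : ia < 26) (hib : ib < 26) (hrel : pvRel g m) :
    pvScan g (pvBVert ia) (pvBVert ib) = (pvMScan m ia ib).map (fun p => (p.1, pvBVert p.2)) := by
  unfold pvScan pvMScan
  rw [pvVerts_eq, List.foldl_map]
  refine pvFoldRel (fun (x : Option (Int × String)) (y : Option (Int × Nat)) =>
      x = y.map (fun p => (p.1, pvBVert p.2))) _ _ (List.range 26) ?_ none none rfl
  intro x y c hcmem hxy
  have hc := List.mem_range.mp hcmem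
  have hca := hrel.2.2.2 ia hia c hc
  have hcb := hrel.2.2.2 ib hib c hc
  rw [hxy]
  cases hma : pvMGet m ia c with
  | none =>
    rw [hma] at hca
    rw [if_neg (by rw [← hca]; simp)]
  | some xv =>
    cases hmb : pvMGet m ib c with
    | none =>
      rw [hmb] at hcb
      rw [if_neg (by rw [← hcb]; simp)]
    | some yv =>
      rw [hma] at hca; rw [hmb] at hcb
      rw [if_pos (by rw [← hca, ← hcb]; simp)]
      have hva : (g.getD (pvBVert ia) PySem.Dict.empty).getD (pvBVert c) 0 = xv := by
        rw [PySem.Dict.getD_eq_get?_getD, ← hca]; rfl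
      have hvb : (g.getD (pvBVert ib) PySem.Dict.empty).getD (pvBVert c) 0 = yv := by
        rw [PySem.Dict.getD_eq_get?_getD, ← hcb]; rfl
      dsimp only
      rw [hva, hvb]
      cases y with
      | none => rfl
      | some bc =>
        dsimp only [Option.map_some]
        by_cases hgt : bc.1 > xv + yv
        · rw [if_pos hgt, if_pos hgt]; rfl
        · rw [if_neg hgt, if_neg hgt]; rfl

-- the two final loops agree
theorem pvLoop_rel (g : PySem.Dict String (PySem.Dict String Int)) (m : List (List (Option Int)))
    (hrel : pvRel g m) (hd : pvDiagOK g) (pairs : List (Char × Char))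
    (hp : ∀ ab ∈ pairs, ab.1 ∈ pvAlpha) (tot : Int) (chars : List String) :
    pvLoopA (pvTables g).1 (pvTables g).2
      (pairs.map (fun p => (String.ofList [p.1], String.ofList [p.2]))) tot chars
      = pvLoopB m pairs tot chars := by
  induction pairs generalizing tot chars with
  | nil => rfl
  | cons ab rest ih =>
    have ha := hp ab (List.mem_cons_self ..)
    obtain ⟨hia26, hsa⟩ := pvChar_idx ab.1 ha
    have hsamem : String.ofList [ab.1] ∈ pvVerts := hsa ▸ pvBVert_mem _ hia26
    have ihr := fun tot chars => ih (fun x hx => hp x (List.mem_cons_of_mem _ hx)) tot chars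
    rw [List.map_cons]
    unfold pvLoopA pvLoopB
    by_cases hab : ab.1 = ab.2
    · rw [if_pos hab]
      have hsb : String.ofList [ab.2] = String.ofList [ab.1] := by rw [hab]
      rw [hsb]
      rw [pvTables_cost g _ _ hsamem hsamem hd, if_pos rfl]
      dsimp only
      have hch : (((pvTables g).2.getD (String.ofList [ab.1]) PySem.Dict.empty).getD (String.ofList [ab.1]) "")
          = String.ofList [ab.1] := by
        rw [PySem.Dict.getD_eq_get?_getD, pvTables_char g _ _ hsamem hsamem hd, if_pos rfl]
        rfl
      rw [hch, show tot + 0 = tot by omega]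
      exact ihr tot (chars ++ [String.ofList [ab.1]])
    · rw [if_neg hab]
      have hsne : String.ofList [ab.1] ≠ String.ofList [ab.2] := fun h => hab (pvOfList_inj _ _ h)
      by_cases hb : ab.2 ∈ pvAlpha
      · obtain ⟨hib26, hsb⟩ := pvChar_idx ab.2 hb
        have hsbmem : String.ofList [ab.2] ∈ pvVerts := hsb ▸ pvBVert_mem _ hib26
        obtain ⟨hb1, hb2⟩ := (pvMem_pvAlpha_iff ab.2).mp hb
        have hguard : (0 ≤ (ab.2.toNat : Int) - 97 ∧ (ab.2.toNat : Int) - 97 < 26) := by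
          constructor <;> [push_cast; push_cast] <;> omega
        rw [if_pos hguard]
        have hibt : ((ab.2.toNat : Int) - 97).toNat = ab.2.toNat - 97 := by omega
        rw [hibt]
        rw [pvTables_cost g _ _ hsamem hsbmem hd, if_neg hsne]
        rw [hsa, hsb, pvScan_rel g m _ _ hia26 hib26 hrel]
        cases hsc : pvMScan m (ab.1.toNat - 97) (ab.2.toNat - 97) with
        | none => rfl
        | some bc =>
          dsimp only [Option.map_some]
          have hch : (((pvTables g).2.getD (pvBVert (ab.1.toNat - 97)) PySem.Dict.empty).getD (pvBVert (ab.2.toNat - 97)) "")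
              = pvBVert bc.2 := by
            rw [PySem.Dict.getD_eq_get?_getD,
                pvTables_char g _ _ (pvBVert_mem _ hia26) (pvBVert_mem _ hib26) hd,
                if_neg (by rw [← hsa, ← hsb]; exact hsne),
                pvScan_rel g m _ _ hia26 hib26 hrel, hsc]
            rfl
          rw [hch]
          exact ihr (tot + bc.1) (chars ++ [pvBVert bc.2])
      · -- target char is not a lowercase letter: both sides return (-1, none)
        have hguard : ¬(0 ≤ (ab.2.toNat : Int) - 97 ∧ (ab.2.toNat : Int) - 97 < 26) := by
          rw [pvMem_pvAlpha_iff] at hb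
          omega
        rw [if_neg hguard]
        have hsbnot : String.ofList [ab.2] ∉ pvVerts := by
          intro hmem
          obtain ⟨j, hj, hjeq⟩ := (pvMem_pvVerts_iff _).mp hmem
          have : ab.2 = Char.ofNat (97 + j) := by
            apply pvOfList_inj
            rw [hjeq]; rfl
          apply hb
          rw [pvMem_pvAlpha_iff, this, pvBVert_toNat j hj]
          omega
        rw [pvTables_cost_none g _ _ hsamem hsbnot]

-- ===== VERDICT (by name: the statement is the Claim_ definition above) =====
theorem minimum_cost_to_make_identical_strings_spec : Claim_equal_minimum_cost_to_make_identical_strings := by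
  intro s t n changes _hdom hpre
  unfold Spec_minimum_cost_to_make_identical_strings
  unfold minimum_cost_to_make_identical_strings minimum_cost_to_make_identical_strings_alt
  by_cases hlen : PySem.Str.len s = PySem.Str.len t
  · rw [if_neg (not_not_intro hlen), if_neg (not_not_intro hlen)]
    obtain ⟨hs, hch⟩ := hpre hlen
    simp only [List.all_eq_true, List.contains_iff_mem] at hs
    exact pvLoop_rel _ _ (pvRel_build changes hch) (pvDiag_build changes)
      (s.toList.zip t.toList)
      (fun ab hab => hs _ (List.of_mem_zip hab).1) 0 []
  · rw [if_pos hlen, if_pos hlen]
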